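-- pv_equiv track=rewrite | github.com/Chenke0023/skyscanner_multi_domain | gui.py | _order_grouped_by_trip_labels
-- ===== SOURCE A (Python) =====
-- from typing import Any
--
-- def _order_grouped_by_trip_labels(
--     trip_labels: list[str],
--     grouped_items: list[tuple[str, Any]],
-- ) -> list[tuple[str, Any]]:
--     order = {label: index for index, label in enumerate(trip_labels)}
--     return sorted(
--         grouped_items,
--         key=lambda item: order.get(item[0], len(order)),
--     )
-- ===== SOURCE B (Python) =====
-- def _order_grouped_by_trip_labels(trip_labels, grouped_items):
--     # Single-pass bucket sort by label index instead of a comparison sort.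
--     order = {label: index for index, label in enumerate(trip_labels)}
--     unknown = len(order)
--     buckets = [[] for _ in range(len(trip_labels) + 1)]
--     for item in grouped_items:
--         buckets[order.get(item[0], unknown)].append(item)
--     result = []
--     for bucket in buckets:
--         result.extend(bucket)
--     return result
-- ===== Notes on version B (the rewrite author's own statement) =====
-- stated objective: alternative
-- what changed: Replaces the comparison sort keyed by the label-order dict with a single-pass bucket sort: items are appended to per-index buckets (unknown labels to bucket len(order)) and the buckets are concatenated in index order.
import Mathlib
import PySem

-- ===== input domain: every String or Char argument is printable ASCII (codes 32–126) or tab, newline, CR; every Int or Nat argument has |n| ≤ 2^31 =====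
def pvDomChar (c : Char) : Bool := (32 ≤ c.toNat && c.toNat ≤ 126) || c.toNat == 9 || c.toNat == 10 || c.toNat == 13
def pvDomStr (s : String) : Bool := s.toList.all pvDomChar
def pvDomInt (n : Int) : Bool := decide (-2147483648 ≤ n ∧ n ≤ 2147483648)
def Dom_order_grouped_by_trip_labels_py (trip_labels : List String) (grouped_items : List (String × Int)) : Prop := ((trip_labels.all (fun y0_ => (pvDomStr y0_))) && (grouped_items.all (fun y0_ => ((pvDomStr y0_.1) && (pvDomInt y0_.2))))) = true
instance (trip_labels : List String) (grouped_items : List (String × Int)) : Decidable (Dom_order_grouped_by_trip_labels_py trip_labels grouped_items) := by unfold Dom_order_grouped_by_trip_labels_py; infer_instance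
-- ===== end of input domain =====

-- B replaces A's comparison sort (stable sort keyed by the label-order dict) with a
-- single-pass bucket sort: per-index buckets, unknown labels in bucket len(order),
-- concatenated in index order; proved to return exactly A's value on every input.


-- ===== PORT A =====
-- order = {label: index for index, label in enumerate(trip_labels)}
def pvOrderDict (trip_labels : List String) : PySem.Dict String Int :=
  (PySem.List.enumerate trip_labels).foldl (fun d p => d.insert p.2 p.1) PySem.Dict.empty

-- return sorted(grouped_items, key=lambda item: order.get(item[0], len(order)))
def order_grouped_by_trip_labels_py (trip_labels : List String) (grouped_items : List (String × Int)) : List (String × Int) :=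
  let order := pvOrderDict trip_labels
  PySem.List.sorted grouped_items (fun item => order.getD item.1 (order.size : Int)) false

-- ===== PORT B =====
-- buckets[k].append(item); k is always in range (0 ≤ k ≤ len(trip_labels)), so the
-- out-of-range case of Python list indexing is never reached.
def pvAppendAt {α : Type} : List (List α) → Nat → α → List (List α)
  | [], _, _ => []
  | b :: bs, 0, x => (b ++ [x]) :: bs
  | b :: bs, k + 1, x => b :: pvAppendAt bs k x

def order_grouped_by_trip_labels_py_alt (trip_labels : List String) (grouped_items : List (String × Int)) : List (String × Int) :=
  let order := pvOrderDict trip_labels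
  let unknown : Int := (order.size : Int)
  let buckets : List (List (String × Int)) := List.replicate (trip_labels.length + 1) []
  let buckets := grouped_items.foldl (fun bs item => pvAppendAt bs (order.getD item.1 unknown).toNat item) buckets
  buckets.foldl (fun result bucket => result ++ bucket) []

-- ===== PRECONDITION & SPEC =====
def Spec_order_grouped_by_trip_labels_py (trip_labels : List String) (grouped_items : List (String × Int)) (out : List (String × Int)) : Prop := out = order_grouped_by_trip_labels_py_alt trip_labels grouped_items
instance (trip_labels : List String) (grouped_items : List (String × Int)) (out : List (String × Int)) : Decidable (Spec_order_grouped_by_trip_labels_py trip_labels grouped_items out) := by unfold Spec_order_grouped_by_trip_labels_py; infer_instance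

-- ===== CLAIM (what is proved, stated in full; the proofs are below) =====
def Claim_equal_order_grouped_by_trip_labels_py : Prop := ∀ (trip_labels : List String) (grouped_items : List (String × Int)), Dom_order_grouped_by_trip_labels_py trip_labels grouped_items → Spec_order_grouped_by_trip_labels_py trip_labels grouped_items (order_grouped_by_trip_labels_py trip_labels grouped_items)

-- ===== LEMMAS AND PROOFS =====

-- values accumulated by the dict-comprehension fold come from the pairs inserted
theorem pvFold_values_mem (l : List (Int × String)) :
    ∀ (d : PySem.Dict String Int) (v : Int),
    v ∈ (l.foldl (fun d p => d.insert p.2 p.1) d).values → v ∈ d.values ∨ ∃ p ∈ l, v = p.1 := by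
  induction l with
  | nil => intro d v hv; exact Or.inl hv
  | cons p l ih =>
    intro d v hv
    rcases ih (d.insert p.2 p.1) v hv with h | ⟨q, hq, hv⟩
    · rcases PySem.Dict.mem_values_insert d p.2 p.1 v h with h | h
      · exact Or.inr ⟨p, by simp, h⟩
      · exact Or.inl h
    · exact Or.inr ⟨q, by simp [hq], hv⟩

-- every value stored in pvOrderDict is an enumerate index: 0 ≤ v < trip_labels.length
theorem pvOrder_values_bound (trip_labels : List String) (v : Int)
    (hv : v ∈ (pvOrderDict trip_labels).values) : 0 ≤ v ∧ v < trip_labels.length := by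
  rcases pvFold_values_mem (PySem.List.enumerate trip_labels) PySem.Dict.empty v hv with h | ⟨p, hp, hv⟩
  · simp [PySem.Dict.values, PySem.Dict.empty] at h
  · rw [PySem.List.mem_enumerate_iff] at hp
    obtain ⟨k, hk, hp⟩ := hp
    subst hp
    simp at hv
    omega

theorem pvSize_insert_le (d : PySem.Dict String Int) (k : String) (v : Int) :
    (d.insert k v).size ≤ d.size + 1 := by
  rw [PySem.Dict.size_insert]
  split <;> omega

theorem pvFold_size_le (l : List (Int × String)) :
    ∀ d : PySem.Dict String Int,
    (l.foldl (fun d p => d.insert p.2 p.1) d).size ≤ d.size + l.length := by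
  induction l with
  | nil => intro d; simp
  | cons p l ih =>
    intro d
    have h1 := ih (d.insert p.2 p.1)
    have h2 := pvSize_insert_le d p.2 p.1
    simp only [List.foldl_cons, List.length_cons]
    omega

theorem pvOrder_size_le (trip_labels : List String) :
    (pvOrderDict trip_labels).size ≤ trip_labels.length := by
  have h := pvFold_size_le (PySem.List.enumerate trip_labels) PySem.Dict.empty
  have he : (PySem.Dict.empty : PySem.Dict String Int).size = 0 := rfl
  have hl : (PySem.List.enumerate trip_labels).length = trip_labels.length :=
    PySem.List.length_enumerate trip_labels 0
  unfold pvOrderDict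
  omega

-- the key A sorts by is always in [0, trip_labels.length]
theorem pvKey_bounds (trip_labels : List String) (s : String) :
    0 ≤ (pvOrderDict trip_labels).getD s ((pvOrderDict trip_labels).size : Int) ∧
    (pvOrderDict trip_labels).getD s ((pvOrderDict trip_labels).size : Int) ≤ trip_labels.length := by
  have hsz := pvOrder_size_le trip_labels
  cases hg : (pvOrderDict trip_labels).get? s with
  | none =>
    rw [PySem.Dict.getD_of_get?_eq_none _ _ hg]
    omega
  | some v =>
    have hmem : (s, v) ∈ (pvOrderDict trip_labels).items :=
      PySem.Dict.mem_items_of_get?_eq_some _ hg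
    have hv : v ∈ (pvOrderDict trip_labels).values := by
      simp only [PySem.Dict.values]
      exact List.mem_map.2 ⟨(s, v), hmem, rfl⟩
    have hb := pvOrder_values_bound trip_labels v hv
    rw [PySem.Dict.getD_eq_get?_getD, hg]
    simpa using ⟨hb.1, le_of_lt hb.2⟩

-- insertBy skips a prefix that the new element does not go before
theorem pvInsertBy_append_left {α : Type} (before : α → α → Bool) (x : α) (l1 l2 : List α)
    (h : ∀ y ∈ l1, before x y = false) :
    PySem.List.insertBy before x (l1 ++ l2) = l1 ++ PySem.List.insertBy before x l2 := by
  induction l1 with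
  | nil => simp
  | cons y t ih =>
    have hy : before x y = false := h y (by simp)
    have ih' := ih (fun z hz => h z (by simp [hz]))
    simp only [List.cons_append, PySem.List.insertBy, hy, Bool.false_eq_true, if_false, ih']

-- insertBy lands exactly between a skipped prefix and a strictly-later suffix
theorem pvInsertBy_append_mid {α : Type} (before : α → α → Bool) (x : α) (l1 l2 : List α)
    (h1 : ∀ y ∈ l1, before x y = false) (h2 : ∀ z ∈ l2, before x z = true) :
    PySem.List.insertBy before x (l1 ++ l2) = l1 ++ x :: l2 := by
  rw [pvInsertBy_append_left before x l1 l2 h1]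
  cases l2 with
  | nil => simp [PySem.List.insertBy]
  | cons z zs => simp [PySem.List.insertBy, h2 z (by simp)]

def pvInv {α : Type} (key : α → Nat) (bs : List (List α)) (off : Nat) : Prop :=
  ∀ i : Nat, ∀ y ∈ bs.getD i [], key y = off + i

theorem pvInv_cons {α : Type} (key : α → Nat) (b : List α) (bs : List (List α)) (off : Nat) :
    pvInv key (b :: bs) off ↔ (∀ y ∈ b, key y = off) ∧ pvInv key bs (off + 1) := by
  unfold pvInv
  constructor
  · intro h
    refine ⟨fun y hy => by simpa using h 0 y (by simpa using hy), fun i y hy => ?_⟩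
    have := h (i + 1) y (by simpa using hy)
    omega
  · rintro ⟨hb, hbs⟩ i y hy
    cases i with
    | zero => simpa using hb y (by simpa using hy)
    | succ j =>
      have := hbs j y (by simpa using hy)
      omega

-- membership in a flattened bucket list determines the key via the invariant
theorem pvKey_of_mem_flatten {α : Type} (key : α → Nat) (bs : List (List α)) (off : Nat)
    (hinv : pvInv key bs off) (z : α) (hz : z ∈ bs.flatten) : off ≤ key z := by
  rw [List.mem_flatten] at hz
  obtain ⟨l, hl, hzl⟩ := hz
  obtain ⟨j, hj, rfl⟩ := List.mem_iff_getElem.1 hl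
  have : bs.getD j [] = bs[j] := List.getD_eq_getElem bs [] hj
  have := hinv j _ (this ▸ hzl)
  omega

-- inserting x (key = off + k) into the flattened buckets is appending it to bucket k
theorem pvFlatten_appendAt {α : Type} (key : α → Nat) (bs : List (List α)) :
    ∀ (off k : Nat) (x : α), key x = off + k → k < bs.length →
    pvInv key bs off →
    PySem.List.insertBy (fun a b => decide (key a < key b)) x bs.flatten = (pvAppendAt bs k x).flatten := by
  induction bs with
  | nil => intro off k x _ hlen _; simp at hlen
  | cons b bs ih =>
    intro off k x hk hlen hinv
    obtain ⟨hb, hinv'⟩ := (pvInv_cons key b bs off).1 hinv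
    cases k with
    | zero =>
      have h1 : ∀ y ∈ b, (decide (key x < key y)) = false := by
        intro y hy
        have := hb y hy
        simp
        omega
      have h2 : ∀ z ∈ bs.flatten, (decide (key x < key z)) = true := by
        intro z hz
        have := pvKey_of_mem_flatten key bs (off + 1) hinv' z hz
        simp
        omega
      rw [List.flatten_cons, pvInsertBy_append_mid _ _ _ _ h1 h2]
      simp [pvAppendAt]
    | succ k' =>
      have h1 : ∀ y ∈ b, (decide (key x < key y)) = false := by
        intro y hy
        have := hb y hy
        simp
        omega
      rw [List.flatten_cons, pvInsertBy_append_left _ _ _ _ h1]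
      rw [ih (off + 1) k' x (by omega) (by simpa using hlen) hinv']
      simp [pvAppendAt]

theorem pvInv_appendAt {α : Type} (key : α → Nat) (bs : List (List α)) :
    ∀ (off k : Nat) (x : α), key x = off + k →
    pvInv key bs off → pvInv key (pvAppendAt bs k x) off := by
  induction bs with
  | nil => intro off k x _ hinv; simpa [pvAppendAt] using hinv
  | cons b bs ih =>
    intro off k x hk hinv
    obtain ⟨hb, hinv'⟩ := (pvInv_cons key b bs off).1 hinv
    cases k with
    | zero =>
      rw [show pvAppendAt (b :: bs) 0 x = (b ++ [x]) :: bs from rfl]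
      refine (pvInv_cons key _ bs off).2 ⟨?_, hinv'⟩
      intro y hy
      rcases List.mem_append.1 hy with h | h
      · exact hb y h
      · simp at h; subst h; omega
    | succ k' =>
      rw [show pvAppendAt (b :: bs) (k' + 1) x = b :: pvAppendAt bs k' x from rfl]
      exact (pvInv_cons key _ _ off).2 ⟨hb, ih (off + 1) k' x (by omega) hinv'⟩

theorem pvLength_appendAt {α : Type} (bs : List (List α)) :
    ∀ (k : Nat) (x : α), (pvAppendAt bs k x).length = bs.length := by
  induction bs with
  | nil => intro k x; rfl
  | cons b bs ih =>
    intro k x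
    cases k with
    | zero => rfl
    | succ k' => simpa [pvAppendAt] using ih k' x

-- the bucket fold tracks the insertion-sort fold through flattening
theorem pvFold_eq {α : Type} (key : α → Nat) (gi : List α) :
    ∀ bs : List (List α), pvInv key bs 0 →
    (∀ item ∈ gi, key item < bs.length) →
    (gi.foldl (fun bs item => pvAppendAt bs (key item) item) bs).flatten =
      gi.foldl (fun acc x => PySem.List.insertBy (fun a b => decide (key a < key b)) x acc) bs.flatten := by
  induction gi with
  | nil => intro bs _ _; rfl
  | cons item gi ih =>
    intro bs hinv hbound
    have hk : key item < bs.length := hbound item (by simp)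
    have hkey : key item = 0 + key item := by omega
    simp only [List.foldl_cons]
    rw [ih (pvAppendAt bs (key item) item)
        (pvInv_appendAt key bs 0 (key item) item hkey hinv)
        (fun z hz => by rw [pvLength_appendAt]; exact hbound z (by simp [hz]))]
    rw [pvFlatten_appendAt key bs 0 (key item) item hkey hk hinv]

theorem pvFoldl_append (bs : List (List (String × Int))) :
    ∀ acc : List (String × Int), bs.foldl (fun result bucket => result ++ bucket) acc = acc ++ bs.flatten := by
  induction bs with
  | nil => intro acc; simp
  | cons b bs ih => intro acc; simp [ih]

theorem pvReplicate_inv (key : (String × Int) → Nat) (n : Nat) :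
    pvInv key (List.replicate n ([] : List (String × Int))) 0 := by
  intro i y hy
  exfalso
  rw [List.getD, List.getElem?_replicate] at hy
  split at hy <;> simp at hy

-- ===== VERDICT (by name: the statement is the Claim_ definition above) =====
theorem order_grouped_by_trip_labels_py_spec : Claim_equal_order_grouped_by_trip_labels_py := by
  intro trip_labels grouped_items _
  unfold Spec_order_grouped_by_trip_labels_py order_grouped_by_trip_labels_py order_grouped_by_trip_labels_py_alt
  simp only []
  set d := pvOrderDict trip_labels with hd
  set keyI : (String × Int) → Int := fun item => d.getD item.1 (d.size : Int) with hkeyI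
  set keyN : (String × Int) → Nat := fun item => (keyI item).toNat with hkeyN
  have hbounds : ∀ item : String × Int, 0 ≤ keyI item ∧ keyI item ≤ trip_labels.length :=
    fun item => pvKey_bounds trip_labels item.1
  have hbe : (fun a b : String × Int => decide (keyI a < keyI b)) =
      (fun a b : String × Int => decide (keyN a < keyN b)) := by
    funext a b
    have ha := hbounds a
    have hb := hbounds b
    simp only [hkeyN, decide_eq_decide]
    omega
  rw [PySem.List.sorted_eq_foldl_insertBy, hbe]
  rw [pvFoldl_append, List.nil_append]
  have h := pvFold_eq keyN grouped_items (List.replicate (trip_labels.length + 1) [])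
    (pvReplicate_inv keyN (trip_labels.length + 1))
    (fun item _ => by
      have := hbounds item
      simp only [hkeyN, List.length_replicate]
      omega)
  simp only [List.flatten_replicate_nil] at h
  exact h.symm
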